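-- pv_equiv track=rewrite | github.com/aopom/prj | lib/wumpus.py | compute_breeze
-- ===== SOURCE A (Python) =====
-- from typing import Dict, Tuple, List, Union
--
-- def compute_breeze(world: List[List[str]], n: int) -> List[List[str]]:
--     for i in range(n):
--         for j in range(n):
--             if "P" in world[i][j]:
--                 if i + 1 < n and "B" not in world[i + 1][j]:
--                     world[i + 1][j] += "B"
--                 if j + 1 < n and "B" not in world[i][j + 1]:
--                     world[i][j + 1] += "B"
--                 if i - 1 >= 0 and "B" not in world[i - 1][j]:
--                     world[i - 1][j] += "B"
--                 if j - 1 >= 0 and "B" not in world[i][j - 1]: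
--                     world[i][j - 1] += "B"
--
--     return world
-- ===== SOURCE B (Python) =====
-- from typing import List
--
--
-- def compute_breeze(world: List[List[str]], n: int) -> List[List[str]]:
--     def pit(i: int, j: int) -> bool:
--         return 0 <= i < n and 0 <= j < n and "P" in world[i][j]
--
--     todo = [(i, j) for i in range(n) for j in range(n)
--             if "B" not in world[i][j]
--             and (pit(i - 1, j) or pit(i + 1, j) or pit(i, j - 1) or pit(i, j + 1))]
--     for i, j in todo:
--         world[i][j] += "B"
--     return world
-- ===== Notes on version B (the rewrite author's own statement) =====
-- stated objective: alternative
-- what changed: Replaces A's scatter (each pit pushes a 'B' into its four neighbors, with nested read-modify-write passes) by a gather: one comprehension collects every cell that lacks 'B' and has an orthogonal pit neighbor, then a single pass appends 'B' to exactly those cells.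
import Mathlib
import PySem

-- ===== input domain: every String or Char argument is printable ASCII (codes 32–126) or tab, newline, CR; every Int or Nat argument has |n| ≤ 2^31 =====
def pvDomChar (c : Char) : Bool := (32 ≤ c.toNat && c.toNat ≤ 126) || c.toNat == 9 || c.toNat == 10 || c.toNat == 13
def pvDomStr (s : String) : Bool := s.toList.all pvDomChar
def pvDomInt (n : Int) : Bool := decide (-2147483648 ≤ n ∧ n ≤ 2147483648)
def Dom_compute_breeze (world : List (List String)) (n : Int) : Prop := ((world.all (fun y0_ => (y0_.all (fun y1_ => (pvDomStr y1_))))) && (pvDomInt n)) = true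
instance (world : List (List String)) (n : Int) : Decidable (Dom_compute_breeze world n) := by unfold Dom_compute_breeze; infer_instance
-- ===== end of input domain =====

-- B replaces A's scatter (each pit pushes 'B' into its four neighbors, read-modify-write) by a
-- gather (collect every cell lacking 'B' that has an orthogonal pit neighbor, then one marking
-- pass); both Pythons mutate `world` in place and return it — the equivalence proved here is
-- about the return value.

-- ===== PORT A =====
-- world[i][j]  (every read either program makes under Pre_ has nonnegative in-range indices,
-- or its value is discarded because the short-circuited bound guard in front of it is false)
def pvCell (w : List (List String)) (i j : Int) : String :=
  PySem.List.pyGetD (PySem.List.pyGetD w i []) j ""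

-- world[i][j] = s
def pvPut (w : List (List String)) (i j : Int) (s : String) : List (List String) :=
  PySem.List.pySetD w i (PySem.List.pySetD (PySem.List.pyGetD w i []) j s)

-- world[i][j] += "B"
def pvAppB (w : List (List String)) (i j : Int) : List (List String) :=
  pvPut w i j (pvCell w i j ++ "B")

-- the body of A's inner loop (the four guarded neighbor writes, in A's order)
def pvStepA (n : Int) (w : List (List String)) (i j : Int) : List (List String) :=
  if PySem.Str.isIn "P" (pvCell w i j) then
    let w1 := if decide (i + 1 < n) && !PySem.Str.isIn "B" (pvCell w (i + 1) j) then
        pvAppB w (i + 1) j else w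
    let w2 := if decide (j + 1 < n) && !PySem.Str.isIn "B" (pvCell w1 i (j + 1)) then
        pvAppB w1 i (j + 1) else w1
    let w3 := if decide (0 ≤ i - 1) && !PySem.Str.isIn "B" (pvCell w2 (i - 1) j) then
        pvAppB w2 (i - 1) j else w2
    if decide (0 ≤ j - 1) && !PySem.Str.isIn "B" (pvCell w3 i (j - 1)) then
        pvAppB w3 i (j - 1) else w3
  else w

def compute_breeze (world : List (List String)) (n : Int) : List (List String) :=
  (PySem.List.pyRange 0 n 1).foldl (fun w i =>
    (PySem.List.pyRange 0 n 1).foldl (fun w j => pvStepA n w i j) w) world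

-- ===== PORT B =====
-- pit(i, j) of Source B
def pvPit (world : List (List String)) (n i j : Int) : Bool :=
  decide (0 ≤ i) && decide (i < n) && decide (0 ≤ j) && decide (j < n) &&
    PySem.Str.isIn "P" (pvCell world i j)

def compute_breeze_alt (world : List (List String)) (n : Int) : List (List String) :=
  let todo := (PySem.List.pyRange 0 n 1).flatMap (fun i =>
    ((PySem.List.pyRange 0 n 1).filter (fun j =>
      !PySem.Str.isIn "B" (pvCell world i j) &&
      (pvPit world n (i - 1) j || pvPit world n (i + 1) j ||
       pvPit world n i (j - 1) || pvPit world n i (j + 1)))).map (fun j => (i, j)))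
  todo.foldl (fun w p => pvAppB w p.1 p.2) world

-- ===== PRECONDITION & SPEC =====
-- Pre_ excludes exactly the inputs where A raises IndexError: grids with fewer than n rows,
-- or a row among the first n with fewer than n columns.
def Pre_compute_breeze (world : List (List String)) (n : Int) : Prop :=
  n ≤ (world.length : Int) ∧ ∀ row ∈ world.take n.toNat, n ≤ (row.length : Int)

instance (world : List (List String)) (n : Int) : Decidable (Pre_compute_breeze world n) := by
  unfold Pre_compute_breeze; infer_instance

def pvWitness_compute_breeze : List (List String) × Int := ([["P", ""], ["", "W"]], 2)

def Spec_compute_breeze (world : List (List String)) (n : Int) (out : List (List String)) : Prop := out = compute_breeze_alt world n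
instance (world : List (List String)) (n : Int) (out : List (List String)) : Decidable (Spec_compute_breeze world n out) := by unfold Spec_compute_breeze; infer_instance

-- ===== CLAIM (what is proved, stated in full; the proofs are below) =====
def Claim_equal_compute_breeze : Prop := ∀ (world : List (List String)) (n : Int), Dom_compute_breeze world n → Pre_compute_breeze world n → Spec_compute_breeze world n (compute_breeze world n)

-- ===== LEMMAS AND PROOFS =====

-- `w` overlaid with one "B" appended to every cell the mask marks
def pvBuild (w : List (List String)) (M : Nat → Nat → Bool) : List (List String) :=
  w.mapIdx fun i row => row.mapIdx fun j s => if M i j then s ++ "B" else s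

-- the set of cells one execution of A's loop body at pit-candidate (i, j) marks
def pvMarkStep (w : List (List String)) (n i j : Int) (x y : Nat) : Bool :=
  pvPit w n i j &&
  (decide ((x : Int) = i + 1 ∧ (y : Int) = j) || decide ((x : Int) = i ∧ (y : Int) = j + 1) ||
   decide ((x : Int) = i - 1 ∧ (y : Int) = j) || decide ((x : Int) = i ∧ (y : Int) = j - 1)) &&
  decide ((x : Int) < n) && decide ((y : Int) < n) &&
  !PySem.Str.isIn "B" (pvCell w x y)

def pvPairs (n : Int) : List (Int × Int) :=
  (PySem.List.pyRange 0 n 1).flatMap fun i => (PySem.List.pyRange 0 n 1).map fun j => (i, j)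

def pvTodo (world : List (List String)) (n : Int) : List (Int × Int) :=
  (PySem.List.pyRange 0 n 1).flatMap (fun i =>
    ((PySem.List.pyRange 0 n 1).filter (fun j =>
      !PySem.Str.isIn "B" (pvCell world i j) &&
      (pvPit world n (i - 1) j || pvPit world n (i + 1) j ||
       pvPit world n i (j - 1) || pvPit world n i (j + 1)))).map (fun j => (i, j)))

-- ---- string facts ----
lemma pvInP_append (l : List Char) :
    PySem.Chars.isIn ['P'] (l ++ ['B']) = PySem.Chars.isIn ['P'] l := by
  apply Bool.eq_iff_iff.mpr
  rw [PySem.Chars.isIn_iff_infix, PySem.Chars.isIn_iff_infix,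
    List.singleton_infix_iff, List.singleton_infix_iff]
  simp

lemma pvInB_append (l : List Char) : PySem.Chars.isIn ['B'] (l ++ ['B']) = true := by
  rw [PySem.Chars.isIn_iff_infix, List.singleton_infix_iff]
  simp

-- ---- pvCell / pvAppB on nonnegative indices ----
lemma pvCell_eq (w : List (List String)) {i j : Int} (hi : 0 ≤ i) (hj : 0 ≤ j) :
    pvCell w i j = (w.getD i.toNat []).getD j.toNat "" := by
  obtain ⟨a, rfl⟩ : ∃ a : Nat, i = (a : Int) := ⟨i.toNat, (Int.toNat_of_nonneg hi).symm⟩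
  obtain ⟨b, rfl⟩ : ∃ b : Nat, j = (b : Int) := ⟨j.toNat, (Int.toNat_of_nonneg hj).symm⟩
  rw [pvCell, PySem.List.pyGetD_natCast, PySem.List.pyGetD_natCast]
  simp

lemma pvAppB_eq (w : List (List String)) {i j : Int} (hi : 0 ≤ i) (hj : 0 ≤ j) :
    pvAppB w i j =
      w.set i.toNat ((w.getD i.toNat []).set j.toNat
        ((w.getD i.toNat []).getD j.toNat "" ++ "B")) := by
  obtain ⟨a, rfl⟩ : ∃ a : Nat, i = (a : Int) := ⟨i.toNat, (Int.toNat_of_nonneg hi).symm⟩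
  obtain ⟨b, rfl⟩ : ∃ b : Nat, j = (b : Int) := ⟨j.toNat, (Int.toNat_of_nonneg hj).symm⟩
  rw [pvAppB, pvPut, pvCell_eq w hi hj, PySem.List.pyGetD_natCast,
    PySem.List.pySetD_natCast, PySem.List.pySetD_natCast]
  simp

-- ---- pvBuild getters ----
lemma pvBuild_getElem? (w : List (List String)) (M : Nat → Nat → Bool) (k : Nat) :
    (pvBuild w M)[k]? = (w[k]?).map fun row => row.mapIdx fun j s => if M k j then s ++ "B" else s := by
  simp [pvBuild, List.getElem?_mapIdx]

lemma pvMapIdx_congr {l : List String} {f g : Nat → String → String}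
    (h : ∀ i s, f i s = g i s) : l.mapIdx f = l.mapIdx g := by
  apply List.ext_getElem?
  intro k
  simp only [List.getElem?_mapIdx]
  cases l[k]? with
  | none => rfl
  | some s => simp [h]

lemma pvBuild_false (w : List (List String)) : pvBuild w (fun _ _ => false) = w := by
  apply List.ext_getElem?
  intro k
  rw [pvBuild_getElem?]
  cases w[k]? with
  | none => rfl
  | some row =>
    simp only [Bool.false_eq_true, if_false, Option.map_some, Option.some.injEq]
    apply List.ext_getElem?
    intro m
    simp only [List.getElem?_mapIdx]
    cases row[m]? <;> rfl

lemma pvRow_getD_build (w : List (List String)) (M : Nat → Nat → Bool) (x : Nat)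
    (hx : x < w.length) :
    (pvBuild w M).getD x [] = (w.getD x []).mapIdx fun j s => if M x j then s ++ "B" else s := by
  rw [List.getD_eq_getElem?_getD, List.getD_eq_getElem?_getD, pvBuild_getElem?,
    List.getElem?_eq_getElem hx]
  rfl

lemma pvCellN_build (w : List (List String)) (M : Nat → Nat → Bool) (x y : Nat)
    (hx : x < w.length) (hy : y < (w.getD x []).length) :
    ((pvBuild w M).getD x []).getD y "" =
      if M x y then (w.getD x []).getD y "" ++ "B" else (w.getD x []).getD y "" := by
  have hrow : w.getD x [] = w[x] := List.getD_eq_getElem _ _ hx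
  have hy' : y < (w[x] : List String).length := hrow ▸ hy
  rw [pvRow_getD_build w M x hx, hrow,
    List.getD_eq_getElem _ _ (by simpa using hy'), List.getElem_mapIdx,
    List.getD_eq_getElem _ _ hy']

-- bounds that Pre_ guarantees for any position inside [0, n)²
lemma pvBounds {w : List (List String)} {n : Int} (hPre : Pre_compute_breeze w n)
    {a b : Int} (h0a : 0 ≤ a) (han : a < n) (h0b : 0 ≤ b) (hbn : b < n) :
    a.toNat < w.length ∧ b.toNat < (w.getD a.toNat []).length := by
  obtain ⟨h1, h2⟩ := hPre
  have hA : a.toNat < w.length := by omega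
  refine ⟨hA, ?_⟩
  have hmem : w.getD a.toNat [] ∈ w.take n.toNat := by
    have hlt : a.toNat < (w.take n.toNat).length := by
      rw [List.length_take]; omega
    have heq : (w.take n.toNat)[a.toNat] = w[a.toNat] := List.getElem_take
    rw [List.getD_eq_getElem _ _ hA, ← heq]
    exact List.getElem_mem hlt
  have := h2 _ hmem
  omega

lemma pvCell_build_int {w : List (List String)} {n : Int} (hPre : Pre_compute_breeze w n)
    (M : Nat → Nat → Bool) {a b : Int} (h0a : 0 ≤ a) (han : a < n) (h0b : 0 ≤ b) (hbn : b < n) :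
    pvCell (pvBuild w M) a b =
      if M a.toNat b.toNat then pvCell w a b ++ "B" else pvCell w a b := by
  obtain ⟨hA, hB⟩ := pvBounds hPre h0a han h0b hbn
  rw [pvCell_eq _ h0a h0b, pvCell_eq _ h0a h0b, pvCellN_build w M _ _ hA hB]

lemma pvHasP_build {w : List (List String)} {n : Int} (hPre : Pre_compute_breeze w n)
    (M : Nat → Nat → Bool) {a b : Int} (h0a : 0 ≤ a) (han : a < n) (h0b : 0 ≤ b) (hbn : b < n) :
    PySem.Str.isIn "P" (pvCell (pvBuild w M) a b) = PySem.Str.isIn "P" (pvCell w a b) := by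
  rw [pvCell_build_int hPre M h0a han h0b hbn]
  split <;> simp [pvInP_append]

lemma pvHasB_build {w : List (List String)} {n : Int} (hPre : Pre_compute_breeze w n)
    (M : Nat → Nat → Bool) {a b : Int} (h0a : 0 ≤ a) (han : a < n) (h0b : 0 ≤ b) (hbn : b < n) :
    PySem.Str.isIn "B" (pvCell (pvBuild w M) a b) =
      (PySem.Str.isIn "B" (pvCell w a b) || M a.toNat b.toNat) := by
  rw [pvCell_build_int hPre M h0a han h0b hbn]
  cases h : M a.toNat b.toNat <;> simp [pvInB_append]

-- appending "B" to an unmarked in-range cell = extending the mask by that cell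
lemma pvAppB_build {w : List (List String)} {n : Int} (hPre : Pre_compute_breeze w n)
    (M : Nat → Nat → Bool) {a b : Int} (h0a : 0 ≤ a) (han : a < n) (h0b : 0 ≤ b) (hbn : b < n)
    (hM : M a.toNat b.toNat = false) :
    pvAppB (pvBuild w M) a b =
      pvBuild w (fun x y => M x y || decide ((x : Int) = a ∧ (y : Int) = b)) := by
  obtain ⟨hA, hB⟩ := pvBounds hPre h0a han h0b hbn
  rw [pvAppB_eq _ h0a h0b, pvCellN_build w M _ _ hA hB, hM, if_neg (by simp),
    pvRow_getD_build w M _ hA]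
  apply List.ext_getElem?
  intro k
  rw [pvBuild_getElem?]
  by_cases hk : k = a.toNat
  · subst hk
    rw [List.getElem?_set_self', pvBuild_getElem?, List.getElem?_eq_getElem hA]
    simp only [Option.map_eq_map, Option.map_some, Function.const_apply, Option.some.injEq]
    have hrow : w.getD a.toNat [] = w[a.toNat] := List.getD_eq_getElem _ _ hA
    rw [← hrow]
    apply List.ext_getElem?
    intro m
    by_cases hm : m = b.toNat
    · subst hm
      have hBm : b.toNat < ((w.getD a.toNat []).mapIdx
          fun j s => if M a.toNat j = true then s ++ "B" else s).length := by
        simpa using hB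
      rw [List.getElem?_set_self', List.getElem?_mapIdx, List.getElem?_mapIdx,
        List.getElem?_eq_getElem hB]
      simp only [Option.map_eq_map, Option.map_some, Function.const_apply, Option.some.injEq]
      rw [if_pos (by simp only [Bool.or_eq_true, decide_eq_true_eq]; right; omega)]
      rw [List.getD_eq_getElem _ _ hB]
    · rw [List.getElem?_set_ne (by omega), List.getElem?_mapIdx, List.getElem?_mapIdx]
      cases (w.getD a.toNat [])[m]? with
      | none => rfl
      | some s =>
        simp only [Option.map_some, Option.some.injEq]
        have hd : decide ((a.toNat : Int) = a ∧ ((m : Int) = b)) = false := by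
          simp only [decide_eq_false_iff_not]
          rintro ⟨-, hmb⟩
          omega
        rw [hd, Bool.or_false]
  · rw [List.getElem?_set_ne (by omega), pvBuild_getElem?]
    cases w[k]? with
    | none => rfl
    | some row =>
      simp only [Option.map_some, Option.some.injEq]
      apply pvMapIdx_congr
      intro m s
      have hd : decide ((k : Int) = a ∧ ((m : Int) = b)) = false := by
        simp only [decide_eq_false_iff_not]
        rintro ⟨hka, -⟩
        omega
      rw [hd, Bool.or_false]

-- one guarded neighbor write of A's loop body, on a masked world
lemma pvLine {w : List (List String)} {n : Int} (hPre : Pre_compute_breeze w n)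
    (M : Nat → Nat → Bool) (a b : Int) (g : Bool)
    (hg : g = true → 0 ≤ a ∧ a < n ∧ 0 ≤ b ∧ b < n) :
    (if g && !PySem.Str.isIn "B" (pvCell (pvBuild w M) a b) then
        pvAppB (pvBuild w M) a b else pvBuild w M)
    = pvBuild w (fun x y => M x y ||
        (g && decide ((x : Int) = a ∧ (y : Int) = b) && !PySem.Str.isIn "B" (pvCell w x y))) := by
  cases g with
  | false =>
    rw [if_neg (by simp)]
    congr 1
    funext x y
    simp
  | true =>
    obtain ⟨h0a, han, h0b, hbn⟩ := hg rfl
    rw [pvHasB_build hPre M h0a han h0b hbn]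
    cases hB : PySem.Str.isIn "B" (pvCell w a b) with
    | true =>
      rw [if_neg (by simp)]
      congr 1
      funext x y
      by_cases hxy : (x : Int) = a ∧ (y : Int) = b
      · rw [decide_eq_true hxy, hxy.1, hxy.2, hB]
        simp
      · rw [decide_eq_false hxy]
        simp
    | false =>
      cases hM : M a.toNat b.toNat with
      | true =>
        rw [if_neg (by simp)]
        congr 1
        funext x y
        by_cases hxy : (x : Int) = a ∧ (y : Int) = b
        · rw [decide_eq_true hxy]
          have hx : x = a.toNat := by omega
          have hy : y = b.toNat := by omega
          subst hx; subst hy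
          rw [hM]
          simp
        · rw [decide_eq_false hxy]
          simp
      | false =>
        rw [if_pos (show (true && !(false || false)) = true from rfl), pvAppB_build hPre M h0a han h0b hbn hM]
        congr 1
        funext x y
        by_cases hxy : (x : Int) = a ∧ (y : Int) = b
        · rw [decide_eq_true hxy, hxy.1, hxy.2, hB]
          simp
        · rw [decide_eq_false hxy]
          simp

-- one full execution of A's loop body, on a masked world
lemma pvStepA_build {w : List (List String)} {n : Int} (hPre : Pre_compute_breeze w n)
    (M : Nat → Nat → Bool) {i j : Int} (h0i : 0 ≤ i) (hin : i < n) (h0j : 0 ≤ j) (hjn : j < n) :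
    pvStepA n (pvBuild w M) i j =
      pvBuild w (fun x y => M x y || pvMarkStep w n i j x y) := by
  have hPit : pvPit w n i j = PySem.Str.isIn "P" (pvCell w i j) := by
    simp [pvPit, h0i, hin, h0j, hjn]
  have hP' := pvHasP_build hPre M h0i hin h0j hjn
  by_cases hP : PySem.Str.isIn "P" (pvCell w i j) = true
  · simp only [pvStepA, hP', hP, if_true]
    rw [pvLine hPre M (i + 1) j (decide (i + 1 < n)) (by intro h; simp at h; omega)]
    rw [pvLine hPre _ i (j + 1) (decide (j + 1 < n)) (by intro h; simp at h; omega)]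
    rw [pvLine hPre _ (i - 1) j (decide (0 ≤ i - 1)) (by intro h; simp at h; omega)]
    rw [pvLine hPre _ i (j - 1) (decide (0 ≤ j - 1)) (by intro h; simp at h; omega)]
    congr 1
    funext x y
    simp only [pvMarkStep, hPit, hP, Bool.true_and]
    cases hB : PySem.Str.isIn "B" (pvCell w (x : Int) (y : Int)) with
    | true =>
      simp only [Bool.not_true, Bool.and_false, Bool.or_false]
    | false =>
      simp only [Bool.not_false, Bool.and_true]
      apply Bool.eq_iff_iff.mpr
      simp only [Bool.or_eq_true, Bool.and_eq_true, decide_eq_true_eq]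
      constructor
      · rintro ((((hMx | ⟨hg1, hx1, hy1⟩) | ⟨hg2, hx2, hy2⟩) | ⟨hg3, hx3, hy3⟩) | ⟨hg4, hx4, hy4⟩)
        · exact Or.inl hMx
        · exact Or.inr ⟨⟨by omega, by omega⟩, by omega⟩
        · exact Or.inr ⟨⟨by omega, by omega⟩, by omega⟩
        · exact Or.inr ⟨⟨by omega, by omega⟩, by omega⟩
        · exact Or.inr ⟨⟨by omega, by omega⟩, by omega⟩
      · rintro (hMx | ⟨⟨hd, hxn⟩, hyn⟩)
        · exact Or.inl (Or.inl (Or.inl (Or.inl hMx)))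
        · rcases hd with ((⟨hx, hy⟩ | ⟨hx, hy⟩) | ⟨hx, hy⟩) | ⟨hx, hy⟩
          · exact Or.inl (Or.inl (Or.inl (Or.inr ⟨by omega, by omega, by omega⟩)))
          · exact Or.inl (Or.inl (Or.inr ⟨by omega, by omega, by omega⟩))
          · exact Or.inl (Or.inr ⟨by omega, by omega, by omega⟩)
          · exact Or.inr ⟨by omega, by omega, by omega⟩
  · have hP2 : PySem.Str.isIn "P" (pvCell (pvBuild w M) i j) = false := by
      rw [hP']
      simpa using hP
    rw [pvStepA, if_neg (by rw [hP2]; exact Bool.false_ne_true)]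
    have hPitF : pvPit w n i j = false := by
      rw [hPit]
      simpa using hP
    congr 1
    funext x y
    simp [pvMarkStep, hPitF]

-- folding A's loop body over a list of in-range positions
lemma pvFoldA {w : List (List String)} {n : Int} (hPre : Pre_compute_breeze w n)
    (L : List (Int × Int)) (M : Nat → Nat → Bool)
    (hL : ∀ p ∈ L, 0 ≤ p.1 ∧ p.1 < n ∧ 0 ≤ p.2 ∧ p.2 < n) :
    L.foldl (fun acc p => pvStepA n acc p.1 p.2) (pvBuild w M) =
      pvBuild w (fun x y => M x y || L.any (fun p => pvMarkStep w n p.1 p.2 x y)) := by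
  induction L generalizing M with
  | nil => simp
  | cons p L ih =>
    obtain ⟨h1, h2, h3, h4⟩ := hL p (by simp)
    rw [List.foldl_cons, pvStepA_build hPre M h1 h2 h3 h4,
      ih _ (fun q hq => hL q (by simp [hq]))]
    congr 1
    funext x y
    simp [Bool.or_assoc]

-- folding B's marking pass over a duplicate-free list of in-range unmarked positions
lemma pvFoldB {w : List (List String)} {n : Int} (hPre : Pre_compute_breeze w n)
    (L : List (Int × Int)) (M : Nat → Nat → Bool)
    (hL : ∀ p ∈ L, 0 ≤ p.1 ∧ p.1 < n ∧ 0 ≤ p.2 ∧ p.2 < n)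
    (hnd : L.Nodup)
    (hM : ∀ p ∈ L, M p.1.toNat p.2.toNat = false) :
    L.foldl (fun acc p => pvAppB acc p.1 p.2) (pvBuild w M) =
      pvBuild w (fun x y => M x y || L.any (fun p => decide ((x : Int) = p.1 ∧ (y : Int) = p.2))) := by
  induction L generalizing M with
  | nil => simp
  | cons p L ih =>
    obtain ⟨h1, h2, h3, h4⟩ := hL p (by simp)
    have hM' : ∀ q ∈ L,
        (fun x y => M x y || decide ((x : Int) = p.1 ∧ (y : Int) = p.2)) q.1.toNat q.2.toNat
          = false := by
      intro q hq
      obtain ⟨q1, q2, q3, q4⟩ := hL q (by simp [hq])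
      simp only [hM q (by simp [hq]), Bool.false_or, decide_eq_false_iff_not]
      rintro ⟨ha, hb⟩
      have : q = p := Prod.ext (by omega) (by omega)
      exact (List.nodup_cons.mp hnd).1 (this ▸ hq)
    rw [List.foldl_cons, pvAppB_build hPre M h1 h2 h3 h4 (hM p (by simp)),
      ih _ (fun q hq => hL q (by simp [hq])) (List.nodup_cons.mp hnd).2 hM']
    congr 1
    funext x y
    simp [Bool.or_assoc]

lemma pvMem_pairs (n : Int) (p : Int × Int) :
    p ∈ pvPairs n ↔ 0 ≤ p.1 ∧ p.1 < n ∧ 0 ≤ p.2 ∧ p.2 < n := by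
  simp only [pvPairs, List.mem_flatMap, List.mem_map, PySem.List.mem_pyRange_one]
  constructor
  · rintro ⟨i, ⟨hi1, hi2⟩, j, ⟨hj1, hj2⟩, rfl⟩
    exact ⟨hi1, hi2, hj1, hj2⟩
  · rintro ⟨h1, h2, h3, h4⟩
    exact ⟨p.1, ⟨h1, h2⟩, p.2, ⟨h3, h4⟩, rfl⟩

lemma pvMem_todo (w : List (List String)) (n : Int) (p : Int × Int) :
    p ∈ pvTodo w n ↔ (0 ≤ p.1 ∧ p.1 < n ∧ 0 ≤ p.2 ∧ p.2 < n) ∧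
      (!PySem.Str.isIn "B" (pvCell w p.1 p.2) &&
       (pvPit w n (p.1 - 1) p.2 || pvPit w n (p.1 + 1) p.2 ||
        pvPit w n p.1 (p.2 - 1) || pvPit w n p.1 (p.2 + 1))) = true := by
  simp only [pvTodo, List.mem_flatMap, List.mem_map, List.mem_filter,
    PySem.List.mem_pyRange_one]
  constructor
  · rintro ⟨i, ⟨hi1, hi2⟩, j, ⟨⟨hj1, hj2⟩, hc⟩, rfl⟩
    exact ⟨⟨hi1, hi2, hj1, hj2⟩, hc⟩
  · rintro ⟨⟨h1, h2, h3, h4⟩, hc⟩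
    exact ⟨p.1, ⟨h1, h2⟩, p.2, ⟨⟨h3, h4⟩, hc⟩, rfl⟩

lemma pvTodo_nodup (w : List (List String)) (n : Int) : (pvTodo w n).Nodup := by
  rw [pvTodo, List.nodup_flatMap]
  constructor
  · intro i _
    exact ((PySem.List.nodup_pyRange_one 0 n).filter _).map
      (fun a b h => by simpa using congrArg Prod.snd h)
  · have h := PySem.List.pairwise_lt_pyRange_one 0 n
    refine h.imp ?_
    intro a b hab p hp hq
    simp only [List.mem_map] at hp hq
    obtain ⟨j1, -, rfl⟩ := hp
    obtain ⟨j2, -, h2⟩ := hq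
    have : b = a := by simpa using congrArg Prod.fst h2
    omega

-- the two final masks agree
lemma pvMasks (w : List (List String)) (n : Int) (x y : Nat) :
    (pvPairs n).any (fun p => pvMarkStep w n p.1 p.2 x y) =
      (pvTodo w n).any (fun p => decide ((x : Int) = p.1 ∧ (y : Int) = p.2)) := by
  apply Bool.eq_iff_iff.mpr
  simp only [List.any_eq_true]
  constructor
  · rintro ⟨p, hp, hmark⟩
    rw [pvMem_pairs] at hp
    obtain ⟨h1, h2, h3, h4⟩ := hp
    simp only [pvMarkStep, Bool.and_eq_true, Bool.or_eq_true, decide_eq_true_eq] at hmark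
    obtain ⟨⟨⟨⟨hpit, hadj⟩, hxn⟩, hyn⟩, hB⟩ := hmark
    refine ⟨((x : Int), (y : Int)), ?_, by simp⟩
    rw [pvMem_todo]
    refine ⟨⟨by omega, by omega, by omega, by omega⟩, ?_⟩
    simp only [Bool.and_eq_true, Bool.or_eq_true]
    refine ⟨hB, ?_⟩
    rcases hadj with ((⟨hx, hy⟩ | ⟨hx, hy⟩) | ⟨hx, hy⟩) | ⟨hx, hy⟩
    · left; left; left
      rw [show ((x : Int) - 1) = p.1 from by omega, hy]
      exact hpit
    · left; right
      rw [show ((y : Int) - 1) = p.2 from by omega, hx]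
      exact hpit
    · left; left; right
      rw [show ((x : Int) + 1) = p.1 from by omega, hy]
      exact hpit
    · right
      rw [show ((y : Int) + 1) = p.2 from by omega, hx]
      exact hpit
  · rintro ⟨⟨p1, p2⟩, hp, hxy⟩
    rw [decide_eq_true_eq] at hxy
    obtain ⟨hx, hy⟩ := hxy
    subst hx; subst hy
    rw [pvMem_todo] at hp
    obtain ⟨⟨h1, h2, h3, h4⟩, hc⟩ := hp
    simp only [Bool.and_eq_true, Bool.or_eq_true] at hc
    obtain ⟨hB, hpit⟩ := hc
    rcases hpit with ((hpq | hpq) | hpq) | hpq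
    · refine ⟨((x : Int) - 1, (y : Int)), ?_, ?_⟩
      · rw [pvMem_pairs]
        simp only [pvPit, Bool.and_eq_true, decide_eq_true_eq] at hpq
        exact ⟨by omega, by omega, by omega, by omega⟩
      · simp only [pvMarkStep, Bool.and_eq_true, Bool.or_eq_true, decide_eq_true_eq]
        exact ⟨⟨⟨⟨hpq, Or.inl (Or.inl (Or.inl ⟨by omega, by trivial⟩))⟩, by omega⟩, by omega⟩, hB⟩
    · refine ⟨((x : Int) + 1, (y : Int)), ?_, ?_⟩
      · rw [pvMem_pairs]
        simp only [pvPit, Bool.and_eq_true, decide_eq_true_eq] at hpq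
        exact ⟨by omega, by omega, by omega, by omega⟩
      · simp only [pvMarkStep, Bool.and_eq_true, Bool.or_eq_true, decide_eq_true_eq]
        exact ⟨⟨⟨⟨hpq, Or.inl (Or.inr ⟨by omega, by trivial⟩)⟩, by omega⟩, by omega⟩, hB⟩
    · refine ⟨((x : Int), (y : Int) - 1), ?_, ?_⟩
      · rw [pvMem_pairs]
        simp only [pvPit, Bool.and_eq_true, decide_eq_true_eq] at hpq
        exact ⟨by omega, by omega, by omega, by omega⟩
      · simp only [pvMarkStep, Bool.and_eq_true, Bool.or_eq_true, decide_eq_true_eq]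
        exact ⟨⟨⟨⟨hpq, Or.inl (Or.inl (Or.inr ⟨by trivial, by omega⟩))⟩, by omega⟩, by omega⟩, hB⟩
    · refine ⟨((x : Int), (y : Int) + 1), ?_, ?_⟩
      · rw [pvMem_pairs]
        simp only [pvPit, Bool.and_eq_true, decide_eq_true_eq] at hpq
        exact ⟨by omega, by omega, by omega, by omega⟩
      · simp only [pvMarkStep, Bool.and_eq_true, Bool.or_eq_true, decide_eq_true_eq]
        exact ⟨⟨⟨⟨hpq, Or.inr ⟨by trivial, by omega⟩⟩, by omega⟩, by omega⟩, hB⟩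

-- nested range fold = fold over the flattened list of index pairs
lemma pvFoldl_pairs {γ : Type} (f : γ → Int → Int → γ) (L1 L2 : List Int) (init : γ) :
    L1.foldl (fun acc i => L2.foldl (fun acc j => f acc i j) acc) init =
      (L1.flatMap fun i => L2.map fun j => (i, j)).foldl (fun acc p => f acc p.1 p.2) init := by
  induction L1 generalizing init with
  | nil => rfl
  | cons i L1 ih =>
    simp only [List.foldl_cons, List.flatMap_cons, List.foldl_append, List.foldl_map]
    exact ih _

lemma pvA_eq {w : List (List String)} {n : Int} (hPre : Pre_compute_breeze w n) :
    compute_breeze w n =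
      pvBuild w (fun x y => (pvPairs n).any fun p => pvMarkStep w n p.1 p.2 x y) := by
  rw [compute_breeze, pvFoldl_pairs (fun acc i j => pvStepA n acc i j)]
  rw [show ((PySem.List.pyRange 0 n 1).flatMap fun i =>
      (PySem.List.pyRange 0 n 1).map fun j => (i, j)) = pvPairs n from rfl]
  have h := pvFoldA hPre (pvPairs n) (fun _ _ => false)
    (fun p hp => (pvMem_pairs n p).mp hp)
  rw [pvBuild_false] at h
  rw [h]
  congr 1

lemma pvB_eq {w : List (List String)} {n : Int} (hPre : Pre_compute_breeze w n) :
    compute_breeze_alt w n =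
      pvBuild w (fun x y => (pvTodo w n).any fun p => decide ((x : Int) = p.1 ∧ (y : Int) = p.2)) := by
  show (pvTodo w n).foldl (fun acc p => pvAppB acc p.1 p.2) w = _
  have h := pvFoldB hPre (pvTodo w n) (fun _ _ => false)
    (fun p hp => ((pvMem_todo w n p).mp hp).1) (pvTodo_nodup w n) (fun p _ => rfl)
  rw [pvBuild_false] at h
  rw [h]
  congr 1

-- ===== VERDICT (by name: the statement is the Claim_ definition above) =====
theorem compute_breeze_spec : Claim_equal_compute_breeze := by
  intro world n _ hPre
  unfold Spec_compute_breeze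
  rw [pvA_eq hPre, pvB_eq hPre]
  congr 1
  funext x y
  exact pvMasks world n x y
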